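-- pv_equiv track=rewrite | github.com/mariaisabelaacd-ui/ClinTutor-2 | logic.py | exams_points
-- ===== SOURCE A (Python) =====
-- from typing import Dict, List, Any, Generator
--
-- def normalize(s: str) -> str:
--     return (s or "").lower().strip().replace('-', ' ')
--
-- def exams_points(case: Dict[str, Any], requested: List[str]) -> int:
--     pts = 0
--     rel = {k.lower(): v for k, v in case.get("exames_relevantes", {}).items()}
--     opt = {k.lower(): v for k, v in case.get("exames_opcionais", {}).items()}
--     requested_norm = [normalize(x) for x in requested if x and normalize(x) != ""]
--
--     if not requested_norm and rel: return -5
--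
--     for ex in set(requested_norm):
--         if ex in rel: pts += 5
--         elif ex in opt: pts += 2
--         else: pts -= 3
--     return pts
-- ===== SOURCE B (Python) =====
-- def normalize(s: str) -> str:
--     return (s or "").lower().strip().replace('-', ' ')
--
-- def exams_points(case, requested):
--     # Inverted traversal: collect the distinct normalized requests once, charge a
--     # -3 baseline per distinct request, then walk the case's key sets adding the
--     # corrections (+8 for a relevant hit, +5 for an optional-only hit). Correct
--     # because each distinct request scores 5 = -3+8 if relevant, 2 = -3+5 if
--     # optional-only, and -3 otherwise.
--     req = set()
--     for x in requested:
--         n = normalize(x)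
--         if n:
--             req.add(n)
--     rel = {k.lower() for k in case.get("exames_relevantes", {})}
--     if not req and rel:
--         return -5
--     opt = {k.lower() for k in case.get("exames_opcionais", {})}
--     pts = -3 * len(req)
--     for k in rel:
--         if k in req:
--             pts += 8
--     for k in opt:
--         if k in req and k not in rel:
--             pts += 5
--     return pts
-- ===== Notes on version B (the rewrite author's own statement) =====
-- stated objective: alternative
-- what changed: Inverts the traversal: instead of classifying each unique request with an if/elif/else against two lowercased value dicts, B collects the distinct normalized requests into a set in one pass, charges a -3 baseline per distinct request, and then iterates the case's relevant/optional key sets adding +8 / +5 corrections for requests they hit.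
import Mathlib
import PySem

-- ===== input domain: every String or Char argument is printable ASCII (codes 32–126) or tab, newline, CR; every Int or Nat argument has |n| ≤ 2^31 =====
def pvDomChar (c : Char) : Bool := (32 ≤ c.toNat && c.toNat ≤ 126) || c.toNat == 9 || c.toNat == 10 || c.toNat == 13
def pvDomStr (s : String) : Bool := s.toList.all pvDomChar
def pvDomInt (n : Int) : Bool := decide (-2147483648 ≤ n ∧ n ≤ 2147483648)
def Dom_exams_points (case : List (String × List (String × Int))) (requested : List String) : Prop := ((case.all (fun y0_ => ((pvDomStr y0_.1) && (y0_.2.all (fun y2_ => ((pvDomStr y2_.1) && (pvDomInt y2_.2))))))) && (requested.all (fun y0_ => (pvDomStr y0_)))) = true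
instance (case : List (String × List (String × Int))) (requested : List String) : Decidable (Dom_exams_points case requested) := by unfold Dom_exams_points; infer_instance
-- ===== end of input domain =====

-- B inverts the traversal: dedup the requests in one pass, charge -3 per unique request,
-- then walk the case's relevant/optional key sets adding +8 / +5 corrections (objective: alternative).

-- normalize(s) = (s or "").lower().strip().replace('-', ' ')
def pyNormalize (s : String) : String :=
  PySem.Str.replace (PySem.Str.strip (PySem.Str.lower s)) "-" " "

-- ===== PORT A =====
def exams_points (case : List (String × List (String × Int))) (requested : List String) : Int :=
  let rel : PySem.Dict String Int :=
    ((PySem.Dict.mk case).getD "exames_relevantes" []).foldl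
      (fun d kv => d.insert (PySem.Str.lower kv.1) kv.2) PySem.Dict.empty
  let opt : PySem.Dict String Int :=
    ((PySem.Dict.mk case).getD "exames_opcionais" []).foldl
      (fun d kv => d.insert (PySem.Str.lower kv.1) kv.2) PySem.Dict.empty
  let requestedNorm : List String :=
    (requested.filter (fun x => !(x == "") && !(pyNormalize x == ""))).map pyNormalize
  if requestedNorm.isEmpty && !rel.items.isEmpty then -5
  else
    (PySem.Set.ofList requestedNorm).foldl
      (fun pts ex =>
        if rel.contains ex then pts + 5
        else if opt.contains ex then pts + 2
        else pts - 3) 0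

-- ===== PORT B =====
def exams_points_alt (case : List (String × List (String × Int))) (requested : List String) : Int :=
  let uniq : PySem.Set String :=
    requested.foldl (fun u x =>
      if !(pyNormalize x == "") then PySem.Set.add u (pyNormalize x) else u) []
  let rel : PySem.Set String :=
    PySem.Set.ofList (((PySem.Dict.mk case).getD "exames_relevantes" []).map (fun kv => PySem.Str.lower kv.1))
  if uniq.isEmpty && !rel.isEmpty then -5
  else
    let opt : PySem.Set String :=
      PySem.Set.ofList (((PySem.Dict.mk case).getD "exames_opcionais" []).map (fun kv => PySem.Str.lower kv.1))
    let pts0 : Int := -3 * (uniq.length : Int)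
    let pts1 : Int := rel.foldl (fun p k => if uniq.contains k then p + 8 else p) pts0
    opt.foldl (fun p k => if uniq.contains k && !(rel.contains k) then p + 5 else p) pts1

-- ===== PRECONDITION & SPEC =====
def Spec_exams_points (case : List (String × List (String × Int))) (requested : List String) (out : Int) : Prop := out = exams_points_alt case requested
instance (case : List (String × List (String × Int))) (requested : List String) (out : Int) : Decidable (Spec_exams_points case requested out) := by unfold Spec_exams_points; infer_instance

-- ===== CLAIM (what is proved, stated in full; the proofs are below) =====
def Claim_equal_exams_points : Prop := ∀ (case : List (String × List (String × Int))) (requested : List String), Dom_exams_points case requested → Spec_exams_points case requested (exams_points case requested)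

-- ===== LEMMAS AND PROOFS =====

-- A's lowered dict has exactly B's lowered key set as its keys.
theorem keys_lowerDict (L : List (String × Int)) :
    (L.foldl (fun d kv => d.insert (PySem.Str.lower kv.1) kv.2) PySem.Dict.empty).keys
      = PySem.Set.ofList (L.map (fun kv => PySem.Str.lower kv.1)) := by
  have h := PySem.Dict.keys_foldl_insert_key (l := L)
    (key := fun kv : String × Int => PySem.Str.lower kv.1)
    (f := fun (d : PySem.Dict String Int) kv => kv.2) (d := PySem.Dict.empty)
  simpa [PySem.Set.update_nil_left] using h

-- B's dedup loop is Set.update with the nonempty normalized requests.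
theorem uniq_loop (xs : List String) (u : PySem.Set String) :
    xs.foldl (fun u x =>
        if !(pyNormalize x == "") then PySem.Set.add u (pyNormalize x) else u) u
      = PySem.Set.update u ((xs.map pyNormalize).filter (fun n => !(n == ""))) := by
  induction xs generalizing u with
  | nil => simp [PySem.Set.update]
  | cons x t ih =>
    by_cases hx : pyNormalize x = ""
    · have h2 : (!(pyNormalize x == "")) = false := by simp [hx]
      rw [List.foldl_cons, List.map_cons, List.filter_cons, h2]
      simp only [Bool.false_eq_true, if_false]
      exact ih u
    · have h2 : (!(pyNormalize x == "")) = true := by simp [hx]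
      rw [List.foldl_cons, List.map_cons, List.filter_cons, h2, if_pos rfl, if_pos rfl,
        PySem.Set.update_cons, ih]

-- normalize("") = "".
theorem pyNormalize_empty : pyNormalize "" = "" := by decide

-- A's normalized request list = map-then-filter form.
theorem norm_swap (requested : List String) :
    (requested.filter (fun x => !(x == "") && !(pyNormalize x == ""))).map pyNormalize
      = (requested.map pyNormalize).filter (fun n => !(n == "")) := by
  induction requested with
  | nil => rfl
  | cons x t ih =>
    rw [List.map_cons, List.filter_cons (xs := t.map pyNormalize), List.filter_cons]
    by_cases hpx : pyNormalize x = ""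
    · have h2 : (!(pyNormalize x == "")) = false := by simp [hpx]
      have h1 : (!(x == "") && !(pyNormalize x == "")) = false := by simp [hpx]
      rw [h1, h2]
      simp only [Bool.false_eq_true, if_false]
      exact ih
    · have h2 : (!(pyNormalize x == "")) = true := by simp [hpx]
      have hxne : x ≠ "" := by
        intro h; subst h; exact hpx pyNormalize_empty
      have h1 : (!(x == "") && !(pyNormalize x == "")) = true := by simp [hxne, hpx]
      rw [h1, h2, if_pos rfl, if_pos rfl, List.map_cons, ih]

-- A's scoring loop as three filter counts.
theorem foldl_score (N : List String) (p q : String → Bool) (a : Int) :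
    N.foldl (fun pts ex => if p ex then pts + 5 else if q ex then pts + 2 else pts - 3) a
      = a + 5 * ((N.filter p).length : Int)
          + 2 * ((N.filter (fun x => !p x && q x)).length : Int)
          - 3 * ((N.filter (fun x => !p x && !q x)).length : Int) := by
  induction N generalizing a with
  | nil => simp
  | cons x t ih =>
    by_cases hp : p x
    · simp [List.foldl_cons, hp, ih]; ring
    · by_cases hq : q x
      · simp [List.foldl_cons, hp, hq, ih]; ring
      · simp [List.foldl_cons, hp, hq, ih]; ring

-- B's correction loops: a conditional +c fold is c times a filter count.
theorem foldl_if_add (l : List String) (p : String → Bool) (c a : Int) :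
    l.foldl (fun acc k => if p k then acc + c else acc) a
      = a + c * ((l.filter p).length : Int) := by
  induction l generalizing a with
  | nil => simp
  | cons x t ih =>
    by_cases hp : p x
    · simp [List.foldl_cons, hp, ih]; ring
    · simp [List.foldl_cons, hp, ih]

-- Counting an intersection from either side: equal for Nodup lists.
theorem filter_length_swap (l₁ l₂ : List String) (r : String → Bool)
    (h₁ : l₁.Nodup) (h₂ : l₂.Nodup) :
    ((l₁.filter (fun x => l₂.contains x && r x)).length
      = (l₂.filter (fun x => l₁.contains x && r x)).length) := by
  apply List.Perm.length_eq
  rw [List.perm_ext_iff_of_nodup (h₁.filter _) (h₂.filter _)]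
  intro a
  simp only [List.mem_filter, List.contains_iff_mem, Bool.and_eq_true]
  tauto

-- Three-way partition of a list's length by a nested test.
theorem length_partition (N : List String) (p q : String → Bool) :
    ((N.filter p).length : Int)
      + ((N.filter (fun x => !p x && q x)).length : Int)
      + ((N.filter (fun x => !p x && !q x)).length : Int) = (N.length : Int) := by
  induction N with
  | nil => simp
  | cons x t ih =>
    by_cases hp : p x
    · simp [hp]; omega
    · by_cases hq : q x
      · simp [hp, hq]; omega
      · simp [hp, hq]; omega

-- ===== VERDICT (by name: the statement is the Claim_ definition above) =====
theorem exams_points_spec : Claim_equal_exams_points := by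
  intro case requested _
  unfold Spec_exams_points exams_points exams_points_alt
  dsimp only
  rw [norm_swap, uniq_loop requested []]
  set relL := (PySem.Dict.mk case).getD "exames_relevantes" ([] : List (String × Int)) with hrelL
  set optL := (PySem.Dict.mk case).getD "exames_opcionais" ([] : List (String × Int)) with hoptL
  set relS := PySem.Set.ofList (relL.map (fun kv => PySem.Str.lower kv.1)) with hrelS
  set optS := PySem.Set.ofList (optL.map (fun kv => PySem.Str.lower kv.1)) with hoptS
  set relD := relL.foldl (fun d kv => d.insert (PySem.Str.lower kv.1) kv.2) PySem.Dict.empty with hrelD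
  set optD := optL.foldl (fun d kv => d.insert (PySem.Str.lower kv.1) kv.2) PySem.Dict.empty with hoptD
  have hrelK : relD.keys = relS := keys_lowerDict relL
  have hoptK : optD.keys = optS := keys_lowerDict optL
  set N := (requested.map pyNormalize).filter (fun n => !(n == "")) with hN
  have hupd : PySem.Set.update ([] : PySem.Set String) N = PySem.Set.ofList N := rfl
  rw [hupd]
  set U := PySem.Set.ofList N with hU
  have hUnd : U.Nodup := PySem.Set.nodup_ofList N
  have hRnd : relS.Nodup := PySem.Set.nodup_ofList _
  have hOnd : optS.Nodup := PySem.Set.nodup_ofList _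
  -- the guards coincide
  have hempty : N.isEmpty = U.isEmpty := by
    cases hn : N with
    | nil => rw [hU, hn]; rfl
    | cons y t => rw [hU, hn, PySem.Set.ofList_cons]; rfl
  have hguard : relD.items.isEmpty = relS.isEmpty := by
    rw [← hrelK]
    simp only [PySem.Dict.keys]
    cases relD.items <;> rfl
  rw [hempty, hguard]
  by_cases hg : (U.isEmpty && !relS.isEmpty) = true
  · rw [if_pos hg, if_pos hg]
  · rw [if_neg hg, if_neg hg]
    -- membership predicates agree
    have hpc : ∀ ex, relD.contains ex = relS.contains ex := by
      intro ex
      rw [PySem.Dict.contains_eq_decide_mem_keys, hrelK]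
      simp
    have hqc : ∀ ex, optD.contains ex = optS.contains ex := by
      intro ex
      rw [PySem.Dict.contains_eq_decide_mem_keys, hoptK]
      simp
    simp only [hpc, hqc]
    simp only [PySem.Set.contains_eq_listContains]
    have h1 : ((relS.filter (fun k => List.contains U k)).length : Int)
        = ((U.filter (fun x => List.contains relS x)).length : Int) := by
      have hsw : (relS.filter (fun x => List.contains U x && true)).length
          = (U.filter (fun x => List.contains relS x && true)).length :=
        filter_length_swap relS U (fun _ => true) hRnd hUnd
      simpa using hsw
    have h2 : ((optS.filter (fun k => List.contains U k && !(List.contains relS k))).length : Int)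
        = ((U.filter (fun x => !(List.contains relS x) && List.contains optS x)).length : Int) := by
      have hsw : (optS.filter (fun x => List.contains U x && !(List.contains relS x))).length
          = (U.filter (fun x => List.contains optS x && !(List.contains relS x))).length :=
        filter_length_swap optS U (fun k => !(List.contains relS k)) hOnd hUnd
      have hr : (U.filter (fun x => List.contains optS x && !(List.contains relS x)))
          = (U.filter (fun x => !(List.contains relS x) && List.contains optS x)) := by
        apply List.filter_congr
        intro x _
        simp [Bool.and_comm]
      rw [hr] at hsw
      exact_mod_cast hsw
    have hpart := length_partition U (fun x => List.contains relS x) (fun x => List.contains optS x)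
    refine Eq.trans (foldl_score U (fun x => List.contains relS x) (fun x => List.contains optS x) 0) ?_
    refine Eq.symm (Eq.trans (congrArg
      (fun z : Int => List.foldl (fun p k =>
        if (List.contains U k && !(List.contains relS k)) = true then p + 5 else p) z optS)
      (foldl_if_add relS (fun k => List.contains U k) 8 (-3 * (U.length : Int))))
      (Eq.trans (foldl_if_add optS (fun k => List.contains U k && !(List.contains relS k)) 5
        ((-3 * (U.length : Int)) + 8 * ((relS.filter (fun k => List.contains U k)).length : Int))) ?_))
    show (-3 * (U.length : Int)) + 8 * ((relS.filter (fun k => List.contains U k)).length : Int)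
        + 5 * ((optS.filter (fun k => List.contains U k && !(List.contains relS k))).length : Int)
      = 0 + 5 * ((U.filter (fun x => List.contains relS x)).length : Int)
          + 2 * ((U.filter (fun x => !(List.contains relS x) && List.contains optS x)).length : Int)
          - 3 * ((U.filter (fun x => !(List.contains relS x) && !(List.contains optS x))).length : Int)
    omega
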